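-- pv_equiv track=rewrite | github.com/SunivAlgo/Algorithm | JeongHwi/Level_2/문자열 압축/re.py | solution
-- ===== SOURCE A (Python) =====
-- def solution(s):
--     #1~n개씩 자르는 경우 중 가장 짧게 만드는 것
--     strlen = len(s)
--     ans = float("inf")
--     for cut in range(1,strlen+1): # cut : 자르는 문자열의 수 갯수 count of cut string
--         target = s[0:cut]
--         temp = ""
--         count = 0 #중복 문자열 체크
--         for i in range(0,strlen,cut):
--             if target == s[i:i+cut]:
--                 count+=1
--                 continue
--             elif target != s[i:i+cut]:
--                 if count != 1:
--                     temp += str(count)+target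
--                 if count == 1:
--                     temp += target
--                 target = s[i:i+cut]
--                 count = 1
--         if count == 1:
--             temp += target
--         else:
--             temp += str(count)+target
--         ans = min(ans,len(temp))
--     return ans
-- ===== SOURCE B (Python) =====
-- def solution(s):
--     # Staged pipeline: per cut size, collect the chunk indices where a new run
--     # begins (comparing each chunk to its PREDECESSOR), then pair consecutive
--     # boundaries and sum chunk lengths plus run-length digit counts
--     # arithmetically.  No run counter, no compressed string is ever built.
--     # For the empty string the loop is empty and the infinite start value is returned, like A.
--     n = len(s)
--     best = float('inf')
--     for cut in range(1, n + 1):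
--         m = (n + cut - 1) // cut                      # number of chunks
--         starts = [j for j in range(m)
--                   if j == 0 or s[j * cut:(j + 1) * cut] != s[(j - 1) * cut:j * cut]]
--         total = 0
--         for j, nxt in zip(starts, starts[1:] + [m]):
--             r = nxt - j
--             total += min(cut, n - j * cut) + (len(str(r)) if r > 1 else 0)
--         best = min(best, total)
--     return best
-- ===== Notes on version B (the rewrite author's own statement) =====
-- stated objective: alternative
-- what changed: B replaces A's one-pass target/count state machine that concatenates a compressed string with a staged pipeline per cut size: a boundary pass collecting the chunk indices where a chunk differs from its predecessor, then a zip of consecutive boundaries whose differences give the run lengths, summed arithmetically.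
-- outside the precondition, e.g. on solution(''): A returns inf, B returns inf
import Mathlib
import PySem

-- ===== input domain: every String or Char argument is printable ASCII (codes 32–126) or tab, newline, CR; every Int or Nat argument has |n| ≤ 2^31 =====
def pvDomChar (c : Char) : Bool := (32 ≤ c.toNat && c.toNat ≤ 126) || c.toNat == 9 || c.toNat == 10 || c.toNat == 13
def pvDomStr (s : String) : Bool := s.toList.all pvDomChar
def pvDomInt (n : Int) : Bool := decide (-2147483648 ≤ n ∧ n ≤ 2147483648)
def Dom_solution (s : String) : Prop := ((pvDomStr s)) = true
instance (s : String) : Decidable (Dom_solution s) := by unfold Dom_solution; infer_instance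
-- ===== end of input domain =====

-- B replaces A's one-pass target/count state machine (which concatenates a compressed
-- string) with a staged pipeline: collect the run-boundary chunk indices by comparing
-- each chunk to its predecessor, then pair consecutive boundaries with zip and sum the
-- lengths arithmetically (objective: alternative).

-- ===== PORT A =====
-- one step of A's inner loop, acting on the already-extracted chunk s[i:i+cut]
def solutionStepC (st : List Char × List Char × Int) (chunk : List Char) :
    List Char × List Char × Int :=
  let target := st.1
  let temp := st.2.1
  let count := st.2.2
  if chunk = target then (target, temp, count + 1)
  else
    let temp := if count ≠ 1 then temp ++ (PySem.Int.toStr count).toList ++ target else temp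
    let temp := if count = 1 then temp ++ target else temp
    (chunk, temp, 1)

-- the body of A's inner 'for i in range(0, strlen, cut)'
def solutionStep (cut : Int) (cs : List Char) (st : List Char × List Char × Int) (i : Int) :
    List Char × List Char × Int :=
  solutionStepC st (PySem.List.slice cs (some i) (some (i + cut)))

-- A's trailing 'if count == 1 … else …' followed by len(temp)
def solutionFin (st : List Char × List Char × Int) : Int :=
  if st.2.2 = 1 then ((st.2.1 ++ st.1).length : Int)
  else ((st.2.1 ++ (PySem.Int.toStr st.2.2).toList ++ st.1).length : Int)

def solution (s : String) : Int :=
  let cs := s.toList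
  let strlen : Int := (cs.length : Int)
  let ans : Option Int :=                      -- none plays the infinite initial minimum
    (PySem.List.pyRange 1 (strlen + 1) 1).foldl (fun ans cut =>
      let st := (PySem.List.pyRange 0 strlen cut).foldl (solutionStep cut cs)
                  (PySem.List.slice cs (some 0) (some cut), ([] : List Char), (0 : Int))
      let l := solutionFin st
      match ans with
      | none => some l
      | some a => some (min a l)) none
  ans.getD 0  -- none only for the empty string (A returns a float there, not an int; excluded by Pre_)

-- ===== PORT B =====
-- per-cut body of Source B: boundary chunk indices, then zip consecutive boundaries and sum
def bTotal (cs : List Char) (n cut : Int) : Int :=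
  let m : Int := PySem.Int.floordiv (n + cut - 1) cut
  let starts : List Int := (PySem.List.pyRange 0 m 1).filter
    (fun j => j == 0 ||
      (PySem.List.slice cs (some (j * cut)) (some ((j + 1) * cut)) !=
       PySem.List.slice cs (some ((j - 1) * cut)) (some (j * cut))))
  (starts.zip (PySem.List.slice starts (some 1) none ++ [m])).foldl
    (fun total p =>
      let r := p.2 - p.1
      total + min cut (n - p.1 * cut) +
        (if r > 1 then ((PySem.Int.toStr r).toList.length : Int) else 0)) 0

def solution_alt (s : String) : Int :=
  let cs := s.toList
  let n : Int := (cs.length : Int)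
  let best : Option Int :=                     -- none plays the infinite initial minimum
    (PySem.List.pyRange 1 (n + 1) 1).foldl (fun best cut =>
      let total := bTotal cs n cut
      match best with
      | none => some total
      | some b => some (min b total)) none
  best.getD 0  -- none only for s = "" (excluded by Pre_)

-- ===== PRECONDITION & SPEC =====
-- Pre_ excludes only the empty string, on which A returns an infinite float — not a value of the declared int type.
def Pre_solution (s : String) : Prop := s ≠ ""
instance (s : String) : Decidable (Pre_solution s) := by unfold Pre_solution; infer_instance

def pvWitness_solution : String := "aabbaccc"

def Spec_solution (s : String) (out : Int) : Prop := out = solution_alt s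
instance (s : String) (out : Int) : Decidable (Spec_solution s out) := by unfold Spec_solution; infer_instance

-- ===== CLAIM (what is proved, stated in full; the proofs are below) =====
def Claim_equal_solution : Prop := ∀ (s : String), Dom_solution s → Pre_solution s → Spec_solution s (solution s)

-- ===== LEMMAS AND PROOFS =====

-- cost contributed to len(str(r)) only when a run has length r > 1
def digCost (r : Int) : Int := if r > 1 then ((PySem.Int.toStr r).toList.length : Int) else 0

-- cost a finished run (target, count) adds to len(temp) in A's flush
def entryCost (t : List Char) (c : Int) : Int :=
  (if c = 1 then 0 else ((PySem.Int.toStr c).toList.length : Int)) + (t.length : Int)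

-- total compressed length of the chunk list l, A seen as run-processing from state (t, c)
def costRuns : List (List Char) → List Char → Int → Int
  | [], t, c => entryCost t c
  | x :: xs, t, c => if x = t then costRuns xs t (c + 1) else entryCost t c + costRuns xs x 1

-- total compressed length of the chunk list, seen as splitting off maximal runs
def spanSum : List (List Char) → Int
  | [] => 0
  | x :: xs =>
    let w : Nat := (xs.takeWhile (fun y => decide (y = x))).length
    (x.length : Int) + digCost (1 + (w : Int)) +
      spanSum (xs.dropWhile (fun y => decide (y = x)))
termination_by l => l.length
decreasing_by
  simp only [List.length_cons]
  exact Nat.lt_succ_of_le (List.length_dropWhile_le _ _)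

theorem drop_takeWhile_length {α : Type} (p : α → Bool) (l : List α) :
    l.drop (l.takeWhile p).length = l.dropWhile p := by
  induction l with
  | nil => rfl
  | cons x xs ih => by_cases h : p x <;> simp [h, ih]

theorem invA (l : List (List Char)) :
    ∀ t temp c, 1 ≤ c →
      solutionFin (l.foldl solutionStepC (t, temp, c)) = (temp.length : Int) + costRuns l t c := by
  induction l with
  | nil =>
    intro t temp c hc
    simp only [List.foldl_nil, solutionFin, costRuns, entryCost]
    split_ifs with h
    · push_cast [List.length_append]; ring
    · push_cast [List.length_append]; ring
  | cons x xs ih =>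
    intro t temp c hc
    simp only [List.foldl_cons]
    by_cases hx : x = t
    · rw [show solutionStepC (t, temp, c) x = (t, temp, c + 1) from by simp [solutionStepC, hx]]
      rw [ih t temp (c + 1) (by omega)]
      simp only [costRuns]
      rw [if_pos hx]
    · rw [show solutionStepC (t, temp, c) x =
          (x, (if c = 1 then temp ++ t else temp ++ (PySem.Int.toStr c).toList ++ t), 1) from by
        by_cases hc1 : c = 1 <;> simp [solutionStepC, hx, hc1]]
      rw [ih x _ 1 le_rfl]
      simp only [costRuns]
      rw [if_neg hx]
      simp only [entryCost]
      by_cases hc1 : c = 1 <;> simp only [hc1, if_pos, ite_false] <;>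
        push_cast [List.length_append] <;> ring

theorem bridge (l : List (List Char)) :
    ∀ t c, 1 ≤ c →
      costRuns l t c =
        digCost (c + ((l.takeWhile (fun y => decide (y = t))).length : Int)) + (t.length : Int) +
        spanSum (l.dropWhile (fun y => decide (y = t))) := by
  induction l with
  | nil =>
    intro t c hc
    simp only [costRuns, entryCost, List.takeWhile_nil, List.dropWhile_nil, List.length_nil,
      Nat.cast_zero, add_zero, spanSum, digCost]
    split_ifs with h1 h2 <;> first | (exfalso; omega) | ring
  | cons x xs ih =>
    intro t c hc
    by_cases hx : x = t
    · subst hx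
      simp only [costRuns]
      rw [if_pos trivial]
      rw [ih x (c + 1) (by omega)]
      simp only [List.takeWhile_cons, List.dropWhile_cons, decide_eq_true_eq,
        List.length_cons, Nat.cast_add, Nat.cast_one, ite_true]
      have h2 : (c + 1) + ((xs.takeWhile (fun y => decide (y = x))).length : Int) =
          c + (((xs.takeWhile (fun y => decide (y = x))).length : Int) + 1) := by ring
      rw [h2]
    · have hpx : decide (x = t) = false := by simp [hx]
      simp only [costRuns]
      rw [if_neg hx]
      rw [ih x 1 le_rfl]
      simp only [List.takeWhile_cons, List.dropWhile_cons, hpx, Bool.false_eq_true, if_false,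
        List.length_nil, Nat.cast_zero, add_zero, entryCost, digCost]
      rw [spanSum]
      simp only [digCost]
      split_ifs with h1 h2 <;> first | (exfalso; omega) | ring

-- A's per-cut value is the compressed length of the chunk list
theorem percutA (cs : List Char) (cut : Int) (hcut : 1 ≤ cut) (hn : 1 ≤ cs.length) :
    solutionFin ((PySem.List.pyRange 0 (cs.length : Int) cut).foldl (solutionStep cut cs)
        (PySem.List.slice cs (some 0) (some cut), ([] : List Char), (0 : Int))) =
      spanSum ((PySem.List.pyRange 0 (cs.length : Int) cut).map
        (fun i => PySem.List.slice cs (some i) (some (i + cut)))) := by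
  have h0n : (0 : Int) < (cs.length : Int) := by exact_mod_cast hn
  have hK := PySem.List.pyRange_of_pos 0 (cs.length : Int) (show (0 : Int) < cut by omega)
  rw [if_pos h0n] at hK
  have hKne : (((cs.length : Int) - 0 + cut - 1) / cut).toNat ≠ 0 := by
    intro hz
    have hmem : (0 : Int) ∈ PySem.List.pyRange 0 (cs.length : Int) cut := by
      rw [PySem.List.mem_pyRange_iff_of_pos (show (0 : Int) < cut by omega)]
      exact ⟨le_refl 0, h0n, ⟨0, by ring⟩⟩
    rw [hK, hz] at hmem
    simp at hmem
  obtain ⟨K', hK'⟩ := Nat.exists_eq_succ_of_ne_zero hKne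
  rw [hK', List.range_succ_eq_map, List.map_cons, List.map_map] at hK
  have hz0 : ((0 : Int) + cut * ((0 : Nat) : Int)) = 0 := by simp
  rw [hz0] at hK
  rw [hK]
  simp only [List.map_cons, List.foldl_cons]
  have hstep : solutionStep cut cs
      (PySem.List.slice cs (some 0) (some cut), ([] : List Char), (0 : Int)) 0 =
      (PySem.List.slice cs (some 0) (some cut), ([] : List Char), (1 : Int)) := by
    simp [solutionStep, solutionStepC]
  rw [hstep]
  have hfm : ∀ (l : List Int) (init : List Char × List Char × Int),
      l.foldl (solutionStep cut cs) init =
      (l.map (fun i => PySem.List.slice cs (some i) (some (i + cut)))).foldl solutionStepC init := by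
    intro l init
    rw [List.foldl_map]
    rfl
  rw [hfm]
  have hhead : PySem.List.slice cs (some 0) (some (0 + cut)) = PySem.List.slice cs (some 0) (some cut) := by
    norm_num
  rw [hhead]
  rw [invA _ _ _ 1 le_rfl]
  rw [spanSum]
  rw [bridge _ _ 1 le_rfl]
  simp only [List.length_nil, Nat.cast_zero, zero_add]
  ring

-- ---- B side: boundary indices of a chunk list ----

-- run-start indices of L (j = 0 or L[j] ≠ L[j-1]) — abstract form of Source B's 'starts'
def bndN (L : List (List Char)) : List Nat :=
  (List.range L.length).filter (fun j => j == 0 || (L.getD j [] != L.getD (j - 1) []))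

-- boundary indices of xs relative to a preceding chunk prev
def bndRel (prev : List Char) (xs : List (List Char)) : List Nat :=
  (List.range xs.length).filter (fun j => xs.getD j [] != (prev :: xs).getD j [])

-- Source B's per-cut sum, over an abstract boundary list S
def pairSum (L : List (List Char)) (S : List Nat) : Int :=
  ((S.zip (S.drop 1 ++ [L.length])).map
    (fun p => ((L.getD p.1 []).length : Int) + digCost ((p.2 : Int) - (p.1 : Int)))).sum

theorem bndN_cons (x : List Char) (xs : List (List Char)) :
    bndN (x :: xs) = 0 :: (bndRel x xs).map (· + 1) := by
  unfold bndN bndRel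
  rw [List.length_cons, List.range_succ_eq_map, List.filter_cons, List.filter_map]
  simp [Function.comp_def, Nat.succ_eq_add_one]

theorem bndRel_cons_self (x : List Char) (t : List (List Char)) :
    bndRel x (x :: t) = (bndRel x t).map (· + 1) := by
  unfold bndRel
  rw [List.length_cons, List.range_succ_eq_map, List.filter_cons, List.filter_map]
  simp [Function.comp_def, Nat.succ_eq_add_one]

theorem bndRel_cons_ne (x y : List Char) (t : List (List Char)) (h : ¬ y = x) :
    bndRel x (y :: t) = 0 :: (bndRel y t).map (· + 1) := by
  unfold bndRel
  rw [List.length_cons, List.range_succ_eq_map, List.filter_cons, List.filter_map]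
  simp [Function.comp_def, Nat.succ_eq_add_one, h]

theorem bndRel_run (x : List Char) (xs : List (List Char)) :
    bndRel x xs = (bndN (xs.dropWhile (fun y => decide (y = x)))).map
      (· + (xs.takeWhile (fun y => decide (y = x))).length) := by
  induction xs generalizing x with
  | nil => simp [bndRel, bndN]
  | cons y t ih =>
    by_cases h : y = x
    · subst h
      rw [bndRel_cons_self, ih y]
      simp only [List.takeWhile_cons, List.dropWhile_cons, decide_eq_true_eq, ite_true,
        List.length_cons, List.map_map]
      apply List.map_congr_left
      intro a _
      simp only [Function.comp_def]
      omega
    · rw [bndRel_cons_ne x y t h]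
      have hd : decide (y = x) = false := by simp [h]
      simp only [List.takeWhile_cons, List.dropWhile_cons, hd, Bool.false_eq_true, if_false,
        List.length_nil]
      rw [bndN_cons]
      simp

theorem bndN_run (x : List Char) (xs : List (List Char)) :
    bndN (x :: xs) = 0 :: (bndN (xs.dropWhile (fun y => decide (y = x)))).map
      (· + ((xs.takeWhile (fun y => decide (y = x))).length + 1)) := by
  rw [bndN_cons, bndRel_run, List.map_map]
  congr 1

theorem getD_drop_chunks (L : List (List Char)) (k a : Nat) :
    (L.drop k).getD a [] = L.getD (k + a) [] := by
  simp [List.getD_eq_getElem?_getD, List.getElem?_drop]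

-- shifting every boundary by k moves the sum from L to L.drop k
theorem pairSum_shift (L rest : List (List Char)) (k : Nat) (hd : L.drop k = rest)
    (hL : L.length = rest.length + k) (S : List Nat) :
    (((S.map (· + k)).zip ((S.map (· + k)).drop 1 ++ [L.length])).map
      (fun p => ((L.getD p.1 []).length : Int) + digCost ((p.2 : Int) - (p.1 : Int)))).sum =
    pairSum rest S := by
  unfold pairSum
  have h2 : (S.map (· + k)).drop 1 ++ [L.length] = (S.drop 1 ++ [rest.length]).map (· + k) := by
    rw [List.map_append, ← List.map_drop, hL]
    rfl
  rw [h2, List.zip_map, List.map_map]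
  congr 1
  apply List.map_congr_left
  intro p _
  simp only [Function.comp_def, Prod.map]
  have hg : L.getD (p.1 + k) [] = rest.getD p.1 [] := by
    rw [← hd, getD_drop_chunks, Nat.add_comm]
  rw [hg]
  congr 2
  push_cast
  ring

theorem pairSum_eq (L : List (List Char)) : pairSum L (bndN L) = spanSum L := by
  induction L using spanSum.induct with
  | case1 => simp [pairSum, bndN, spanSum]
  | case2 x xs ih =>
    rw [spanSum, bndN_run]
    cases hrest : xs.dropWhile (fun y => decide (y = x)) with
    | nil =>
      have htw : xs.takeWhile (fun y => decide (y = x)) = xs := by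
        have h := List.takeWhile_append_dropWhile (p := fun y => decide (y = x)) (l := xs)
        rwa [hrest, List.append_nil] at h
      simp only [bndN, List.length_nil, List.range_zero, List.filter_nil, List.map_nil]
      unfold pairSum
      simp only [List.zip_cons_cons, List.drop_succ_cons, List.drop_nil, List.nil_append,
        List.zip_nil_right, List.map_cons, List.map_nil, List.sum_cons, List.sum_nil,
        List.getD_cons_zero, List.length_cons, spanSum, htw]
      have hc : (((xs.length + 1 : Nat) : Int) - ((0 : Nat) : Int)) = 1 + (xs.length : Int) := by
        push_cast; ring
      rw [hc]
    | cons y t =>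
      set w := (xs.takeWhile (fun y => decide (y = x))).length with hw
      -- the tail of the zip is the shifted pair sum of the rest
      have hdrop : (x :: xs).drop (w + 1) = y :: t := by
        have h1 : (x :: xs).drop (w + 1) = xs.drop w := by simp
        rw [h1, hw, drop_takeWhile_length, hrest]
      have hlen : (x :: xs).length = (y :: t).length + (w + 1) := by
        have h := List.takeWhile_append_dropWhile (p := fun y => decide (y = x)) (l := xs)
        have h2 : xs.length = w + (y :: t).length := by
          rw [← h, hrest]; simp [hw]
        simp [h2]; omega
      have hshift := pairSum_shift (x :: xs) (y :: t) (w + 1) hdrop hlen (bndN (y :: t))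
      rw [bndN_cons] at hshift ⊢
      unfold pairSum at hshift ⊢
      simp only [List.map_cons, List.zip_cons_cons, List.drop_succ_cons, List.drop_zero,
        List.cons_append, List.sum_cons, List.getD_cons_zero] at hshift ⊢
      rw [hshift]
      rw [hrest, bndN_cons] at ih
      unfold pairSum at ih
      simp only [List.map_cons, List.drop_succ_cons, List.drop_zero] at ih
      rw [ih]
      have hc : ((((0 : Nat) + (w + 1) : Nat) : Int) - ((0 : Nat) : Int)) = 1 + (w : Int) := by
        push_cast; ring
      rw [hc]

-- Source B's per-cut value is also the compressed length of the chunk list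
theorem percutB (cs : List Char) (cut : Int) (hcut : 1 ≤ cut) (hn : 1 ≤ cs.length) :
    bTotal cs (cs.length : Int) cut =
      spanSum ((PySem.List.pyRange 0 (cs.length : Int) cut).map
        (fun i => PySem.List.slice cs (some i) (some (i + cut)))) := by
  have hcpos : (0 : Int) < cut := by omega
  have h0n : (0 : Int) < (cs.length : Int) := by exact_mod_cast hn
  have hc' : ((cut.toNat : Nat) : Int) = cut := Int.toNat_of_nonneg (le_of_lt hcpos)
  -- the chunk list
  have hK := PySem.List.pyRange_of_pos 0 (cs.length : Int) hcpos
  rw [if_pos h0n] at hK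
  simp only [sub_zero] at hK
  set K : Nat := (((cs.length : Int) + cut - 1) / cut).toNat with hKdef
  set G : Nat → List Char :=
    fun k => PySem.List.slice cs (some (0 + cut * (k : Int))) (some (0 + cut * (k : Int) + cut))
    with hG
  have hchunks : (PySem.List.pyRange 0 (cs.length : Int) cut).map
      (fun i => PySem.List.slice cs (some i) (some (i + cut))) = (List.range K).map G := by
    rw [hK, List.map_map]
    rfl
  rw [hchunks]
  set chunks : List (List Char) := (List.range K).map G with hchunksdef
  have hlenchunks : chunks.length = K := by simp [hchunksdef]
  -- k < K bounds the chunk offset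
  have hoff : ∀ k : Nat, k < K → cut.toNat * k < cs.length := by
    intro k hk
    have h1 : (k : Int) < ((cs.length : Int) + cut - 1) / cut := Int.lt_toNat.mp hk
    have h2 : ((k : Int) + 1) * cut ≤ (cs.length : Int) + cut - 1 :=
      (Int.le_ediv_iff_mul_le hcpos).mp (by omega)
    have h3 : (k : Int) * cut < (cs.length : Int) := by nlinarith
    have h4 : ((cut.toNat * k : Nat) : Int) < (cs.length : Int) := by
      push_cast [hc']
      nlinarith [h3]
    exact_mod_cast h4
  -- the chunk at a valid index, and its length
  have hGval : ∀ k : Nat, G k = PySem.List.slice cs (some ((cut.toNat * k : Nat) : Int))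
      (some (((cut.toNat * k + cut.toNat : Nat) : Int))) := by
    intro k
    simp only [hG]
    congr 1 <;> (congr 1; push_cast [hc']; ring)
  have hgetD : ∀ k : Nat, k < K → chunks.getD k [] = G k := by
    intro k hk
    rw [hchunksdef]
    exact PySem.List.getD_map_range G K k [] hk
  have hchunklen : ∀ k : Nat, k < K →
      min cut ((cs.length : Int) - (k : Int) * cut) = ((chunks.getD k []).length : Int) := by
    intro k hk
    rw [hgetD k hk, hGval k, PySem.List.slice_natCast]
    have hq : cut.toNat * k < cs.length := hoff k hk
    simp only [List.length_take, List.length_drop]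
    have e1 : cut.toNat * k + cut.toNat - cut.toNat * k = cut.toNat := by omega
    rw [e1, Nat.cast_min, Nat.cast_sub (le_of_lt hq), hc']
    have e2 : ((cut.toNat * k : Nat) : Int) = (k : Int) * cut := by push_cast [hc']; ring
    rw [e2]
  -- B's boundary list is the cast of bndN chunks
  have hm : PySem.Int.floordiv ((cs.length : Int) + cut - 1) cut = (K : Int) := by
    rw [PySem.Int.floordiv_eq_ediv_of_pos hcpos, hKdef]
    exact (Int.toNat_of_nonneg (Int.ediv_nonneg (by omega) (by omega))).symm
  have hrange1 : PySem.List.pyRange 0 (K : Int) 1 =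
      (List.range K).map (fun k : Nat => (k : Int)) := by
    rw [PySem.List.pyRange_one]
    have hKK : (((K : Int) - 0).toNat) = K := by omega
    rw [hKK]
    exact List.map_congr_left (fun a _ => by omega)
  have hstarts :
      ((PySem.List.pyRange 0 (K : Int) 1).filter
        (fun j => j == 0 ||
          (PySem.List.slice cs (some (j * cut)) (some ((j + 1) * cut)) !=
           PySem.List.slice cs (some ((j - 1) * cut)) (some (j * cut))))) =
      (bndN chunks).map (fun k : Nat => (k : Int)) := by
    rw [hrange1, List.filter_map]
    unfold bndN
    rw [hlenchunks]
    refine congrArg (List.map _) (List.filter_congr ?_)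
    intro j hj
    have hjK : j < K := List.mem_range.mp hj
    cases j with
    | zero => simp
    | succ k =>
      have hkK : k < K := by omega
      have e1 : PySem.List.slice cs (some (((k + 1 : Nat) : Int) * cut))
          (some ((((k + 1 : Nat) : Int) + 1) * cut)) = chunks.getD (k + 1) [] := by
        rw [hgetD _ hjK, hGval]
        congr 1 <;> (congr 1; push_cast [hc']; ring)
      have e2 : PySem.List.slice cs (some ((((k + 1 : Nat) : Int) - 1) * cut))
          (some (((k + 1 : Nat) : Int) * cut)) = chunks.getD k [] := by
        rw [hgetD _ hkK, hGval]
        congr 1 <;> (congr 1; push_cast [hc']; ring)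
      simp only [Function.comp_apply]
      rw [e1, e2]
      have f1 : ((((k + 1 : Nat)) : Int) == 0) = false := by rw [beq_eq_false_iff_ne]; omega
      have f2 : (((k + 1 : Nat)) == (0 : Nat)) = false := by simp
      rw [f1, f2]
      simp
  -- assemble
  simp only [bTotal, hm, hstarts, PySem.List.slice_from_one, ← List.drop_one]
  have hzip : ((bndN chunks).map (fun k : Nat => (k : Int))).drop 1 ++ [(K : Int)] =
      ((bndN chunks).drop 1 ++ [chunks.length]).map (fun k : Nat => (k : Int)) := by
    rw [List.map_append, List.map_drop, hlenchunks]
    rfl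
  rw [hzip, List.zip_map, List.foldl_map]
  refine Eq.trans (PySem.List.foldl_congr_mem _ _
    (fun (total : Int) p =>
      total + (((chunks.getD p.1 []).length : Int) + digCost ((p.2 : Int) - (p.1 : Int))))
    0 ?_) ?_
  · intro acc p hp
    have hp1 : p.1 ∈ bndN chunks := (List.of_mem_zip hp).1
    have hp1K : p.1 < K := by
      have h := List.mem_range.mp (List.mem_filter.mp hp1).1
      rw [hlenchunks] at h
      exact h
    simp only [Prod.map, digCost]
    rw [← hchunklen p.1 hp1K]
    ring_nf
  · rw [PySem.List.foldl_add, zero_add, ← pairSum_eq chunks]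
    rfl

-- ===== VERDICT (by name: the statement is the Claim_ definition above) =====
theorem solution_spec : Claim_equal_solution := by
  intro s _ hpre
  unfold Spec_solution solution solution_alt
  have hn : 1 ≤ s.toList.length := by
    have hne : s.toList ≠ [] := fun hl => hpre (by rwa [← String.toList_eq_nil_iff])
    cases hx : s.toList with
    | nil => exact absurd hx hne
    | cons a t => simp
  have hfold :
      (PySem.List.pyRange 1 ((s.toList.length : Int) + 1) 1).foldl (fun ans cut =>
          let st := (PySem.List.pyRange 0 (s.toList.length : Int) cut).foldl (solutionStep cut s.toList)
                      (PySem.List.slice s.toList (some 0) (some cut), ([] : List Char), (0 : Int))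
          let l := solutionFin st
          match ans with
          | none => some l
          | some a => some (min a l)) none =
      (PySem.List.pyRange 1 ((s.toList.length : Int) + 1) 1).foldl (fun best cut =>
          let total := bTotal s.toList (s.toList.length : Int) cut
          match best with
          | none => some total
          | some b => some (min b total)) none := by
    apply PySem.List.foldl_congr_mem
    intro acc cut hcut
    have h1 : 1 ≤ cut := ((PySem.List.mem_pyRange_one).1 hcut).1
    simp only [percutA s.toList cut h1 hn, percutB s.toList cut h1 hn]
  simp only [hfold]
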